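-- pv_equiv track=rewrite | github.com/YevhenKhomenko/advanced_python_course | parsers/arithmetic_parser.py | _find_neg_nums
-- ===== SOURCE A (Python) =====
-- def _find_neg_nums(tokens):
--     """
--     Checks if '-' is at the beginning of the expression and followed by a number or
--     if it is after a bracket '(' before a number. If so, appends '-' to the number.
--     """
--     prev_token = ''
--     final_token_list = []
--     for token in tokens:
--         # ['-', '5', '+', '5']
--         if token == '-' and not prev_token:
--             prev_token = token
--
--         elif token == '(':
--             if prev_token:
--                 final_token_list.append(prev_token)
--
--             prev_token = token
--         # ['5', '-', '(', '-', '5', ')']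
--         elif token == '-' and prev_token == '(':
--             final_token_list.append(prev_token)
--             prev_token = token
--
--         elif prev_token == '-':
--             prev_token += token
--
--         else:
--             if prev_token:
--                 final_token_list.append(prev_token)
--
--             prev_token = token
--
--     if prev_token:
--         final_token_list.append(prev_token)
--
--     return final_token_list
-- ===== SOURCE B (Python) =====
-- def _find_neg_nums(tokens):
--     # Index-based lookahead scan: skip empty tokens, and when a '-' is followed
--     # by a token other than '(', glue '-' onto it and consume both.
--     toks = [t for t in tokens if t]
--     out = []
--     i, n = 0, len(toks)
--     while i < n:
--         if toks[i] == '-' and i + 1 < n and toks[i + 1] != '(':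
--             out.append('-' + toks[i + 1])
--             i += 2
--         else:
--             out.append(toks[i])
--             i += 1
--     return out
-- ===== Notes on version B (the rewrite author's own statement) =====
-- stated objective: alternative
-- what changed: Replaces A's one-slot lookbehind state machine (a mutable prev_token buffer with five branch cases and a final flush) by a first-pass filter of empty tokens plus an index-based lookahead scan that glues '-' onto the following token (unless it is '(') while consuming two tokens at a time.
import Mathlib
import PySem

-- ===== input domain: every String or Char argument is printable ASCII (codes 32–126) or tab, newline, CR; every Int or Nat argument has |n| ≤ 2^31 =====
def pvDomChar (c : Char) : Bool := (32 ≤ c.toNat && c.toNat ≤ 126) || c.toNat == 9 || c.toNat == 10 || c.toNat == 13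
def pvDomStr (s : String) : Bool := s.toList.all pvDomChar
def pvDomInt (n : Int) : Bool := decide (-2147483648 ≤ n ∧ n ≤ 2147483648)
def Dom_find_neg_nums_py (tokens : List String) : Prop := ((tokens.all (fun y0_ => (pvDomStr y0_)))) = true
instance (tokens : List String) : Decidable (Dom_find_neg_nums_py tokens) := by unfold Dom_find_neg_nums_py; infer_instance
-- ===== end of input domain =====

-- B replaces A's one-slot lookbehind buffer by a filter of empty tokens plus an
-- index-based lookahead scan that glues '-' onto its successor (alternative decomposition).

-- ===== PORT A =====
-- One loop step of A: state = (prev_token, final_token_list).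
def fnnStep (st : String × List String) (token : String) : String × List String :=
  if token = "-" ∧ st.1 = "" then (token, st.2)
  else if token = "(" then (token, if st.1 = "" then st.2 else st.2 ++ [st.1])
  else if token = "-" ∧ st.1 = "(" then (token, st.2 ++ [st.1])
  else if st.1 = "-" then (st.1 ++ token, st.2)
  else (token, if st.1 = "" then st.2 else st.2 ++ [st.1])

def find_neg_nums_py (tokens : List String) : List String :=
  let st := tokens.foldl fnnStep ("", [])
  if st.1 = "" then st.2 else st.2 ++ [st.1]

-- ===== PORT B =====
-- The while-loop of Source B: consumes two tokens when '-' merges with its successor.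
def fnnScan : List String → List String
  | [] => []
  | [t] => [t]
  | t :: u :: rest =>
    if t = "-" ∧ u ≠ "(" then ("-" ++ u) :: fnnScan rest
    else t :: fnnScan (u :: rest)

def find_neg_nums_py_alt (tokens : List String) : List String :=
  fnnScan (tokens.filter (fun t => t ≠ ""))

-- ===== PRECONDITION & SPEC =====
def Spec_find_neg_nums_py (tokens : List String) (out : List String) : Prop := out = find_neg_nums_py_alt tokens
instance (tokens : List String) (out : List String) : Decidable (Spec_find_neg_nums_py tokens out) := by unfold Spec_find_neg_nums_py; infer_instance

-- ===== CLAIM (what is proved, stated in full; the proofs are below) =====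
def Claim_equal_find_neg_nums_py : Prop := ∀ (tokens : List String), Dom_find_neg_nums_py tokens → Spec_find_neg_nums_py tokens (find_neg_nums_py tokens)

-- ===== LEMMAS AND PROOFS =====

-- Run A's loop from state st over toks and apply the final flush.
def fnnRun (st : String × List String) (toks : List String) : List String :=
  let st' := toks.foldl fnnStep st
  if st'.1 = "" then st'.2 else st'.2 ++ [st'.1]

lemma fnnStep_flush (p : String) (acc : List String) (t : String)
    (hp0 : p ≠ "") (hpm : p ≠ "-") :
    fnnStep (p, acc) t = fnnStep ("", acc ++ [p]) t := by
  simp only [fnnStep]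
  split_ifs <;> simp_all

lemma fnnRun_flush (p : String) (acc : List String) (toks : List String)
    (hp0 : p ≠ "") (hpm : p ≠ "-") :
    fnnRun (p, acc) toks = fnnRun ("", acc ++ [p]) toks := by
  cases toks with
  | nil => simp [fnnRun, hp0]
  | cons t rest =>
      simp only [fnnRun, List.foldl_cons]
      rw [fnnStep_flush p acc t hp0 hpm]

lemma fnnRun_skip_empty (st : String × List String) (rest : List String) :
    fnnRun (fnnStep st "") rest = fnnRun st rest := by
  obtain ⟨p, acc⟩ := st
  by_cases hp0 : p = ""
  · simp [fnnStep, hp0]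
  · by_cases hpm : p = "-"
    · simp [fnnStep, hpm]
    · have h1 : fnnStep (p, acc) "" = ("", acc ++ [p]) := by
        simp [fnnStep, hp0, hpm]
      rw [h1, fnnRun_flush p acc rest hp0 hpm]

-- A ignores empty-string tokens (they flush the pending buffer no earlier
-- than it would be flushed anyway).
lemma fnnStep_neutral (acc : List String) (t : String) :
    fnnStep ("", acc) t = (t, acc) := by
  simp only [fnnStep]
  split_ifs <;> simp_all

lemma fnnRun_filter (toks : List String) :
    ∀ st, fnnRun st toks = fnnRun st (toks.filter (fun t => t ≠ "")) := by
  induction toks with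
  | nil => intro st; rfl
  | cons t rest ih =>
      intro st
      by_cases h : t = ""
      · subst h
        have hf : (("" :: rest).filter (fun t => t ≠ "")) = rest.filter (fun t => t ≠ "") := by
          simp
        rw [hf]
        show fnnRun (fnnStep st "") rest = _
        rw [fnnRun_skip_empty st rest]
        exact ih st
      · have hf : ((t :: rest).filter (fun t => t ≠ "")) = t :: rest.filter (fun t => t ≠ "") := by
          simp [h]
        rw [hf]
        show fnnRun (fnnStep st t) rest = fnnRun (fnnStep st t) (rest.filter (fun t => t ≠ ""))
        exact ih (fnnStep st t)

lemma neg_append_ne (u : String) (hu : u ≠ "") :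
    "-" ++ u ≠ "" ∧ "-" ++ u ≠ "-" ∧ "-" ++ u ≠ "(" := by
  refine ⟨fun h => ?_, fun h => ?_, fun h => ?_⟩
  · have := congrArg String.toList h
    simp at this
  · have := congrArg String.toList h
    simp at this
    exact hu this
  · have := congrArg String.toList h
    simp at this

-- On empty-free token lists, A's state machine started in the neutral state
-- produces exactly acc ++ (B's lookahead scan).
lemma fnnRun_eq_scan :
    ∀ toks, (∀ t ∈ toks, t ≠ "") → ∀ acc, fnnRun ("", acc) toks = acc ++ fnnScan toks := by
  intro toks
  induction toks using fnnScan.induct with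
  | case1 => intro _ acc; simp [fnnRun, fnnScan]
  | case2 t =>
      intro h acc
      have ht : t ≠ "" := h t (by simp)
      by_cases hm : t = "-"
      · simp [fnnRun, fnnScan, fnnStep, hm]
      · by_cases hb : t = "("
        · simp [fnnRun, fnnScan, fnnStep, hb]
        · simp [fnnRun, fnnScan, fnnStep, hm, hb, ht]
  | case3 t u rest hcond ih =>
      intro h acc
      have hu : u ≠ "" := h u (by simp)
      obtain ⟨htm, hub⟩ := hcond
      have hrest : ∀ x ∈ rest, x ≠ "" := fun x hx => h x (by simp [hx])
      have hstep2 : fnnStep ("-", acc) u = ("-" ++ u, acc) := by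
        by_cases hum : u = "-"
        · simp [fnnStep, hum]
        · simp [fnnStep, hum, hub]
      obtain ⟨h0, hm, _⟩ := neg_append_ne u hu
      have hL : fnnRun ("", acc) (t :: u :: rest) = fnnRun ("-" ++ u, acc) rest := by
        show fnnRun (fnnStep (fnnStep ("", acc) t) u) rest = _
        rw [fnnStep_neutral, htm, hstep2]
      rw [hL, fnnRun_flush _ _ _ h0 hm, ih hrest]
      simp [fnnScan, htm, hub]
  | case4 t u rest hcond ih =>
      intro h acc
      have ht : t ≠ "" := h t (by simp)
      have hrest : ∀ x ∈ u :: rest, x ≠ "" := fun x hx => h x (by simp at hx; simp [hx])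
      have hscan : fnnScan (t :: u :: rest) = t :: fnnScan (u :: rest) := by
        simp only [fnnScan, if_neg hcond]
      have hL : fnnRun ("", acc) (t :: u :: rest) = fnnRun (t, acc) (u :: rest) := by
        show fnnRun (fnnStep ("", acc) t) (u :: rest) = _
        rw [fnnStep_neutral]
      by_cases htm : t = "-"
      · have hub : u = "(" := by
          by_contra hub
          exact hcond ⟨htm, hub⟩
        have hstepA : fnnStep ("-", acc) "(" = ("(", acc ++ ["-"]) := by
          simp [fnnStep]
        have hstepB : fnnStep ("", acc ++ ["-"]) "(" = ("(", acc ++ ["-"]) := by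
          simp [fnnStep]
        have hM : fnnRun (t, acc) (u :: rest) = fnnRun ("", acc ++ [t]) (u :: rest) := by
          subst htm; subst hub
          show fnnRun (fnnStep ("-", acc) "(") rest = fnnRun (fnnStep ("", acc ++ ["-"]) "(") rest
          rw [hstepA, hstepB]
        rw [hL, hM, ih hrest, hscan]
        simp
      · rw [hL, fnnRun_flush _ _ _ ht htm, ih hrest, hscan]
        simp


-- ===== VERDICT (by name: the statement is the Claim_ definition above) =====
theorem find_neg_nums_py_spec : Claim_equal_find_neg_nums_py := by
  intro tokens _
  show find_neg_nums_py tokens = find_neg_nums_py_alt tokens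
  have h1 : find_neg_nums_py tokens = fnnRun ("", []) tokens := rfl
  rw [h1, fnnRun_filter tokens ("", [])]
  rw [fnnRun_eq_scan (tokens.filter (fun t => t ≠ "")) (by
    intro t ht
    have := List.of_mem_filter ht
    simpa using this) []]
  rfl
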